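-- pv_equiv track=rewrite | github.com/edt-yxz-zzd/python3_src | seed/math/factor_pint_as_pefect_power_.py | _prepare4kth_root_
-- ===== SOURCE A (Python) =====
-- def _prepare4kth_root_(max_k, max_n, /):
--     _k2pow2rt = [None, None]
--     for k in range(2, 1+max_k):
--         d = {}
--         for i in range(2, 1+max_n):
--             n = i**k #kpow
--             if n > max_n:break
--             d[n] = i
--         _k2pow2rt.append(d)
--     return _k2pow2rt
-- ===== SOURCE B (Python) =====
-- def _prepare4kth_root_(max_k, max_n, /):
--     # loops transposed vs A: outer over bases i (while i*i <= max_n),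
--     # inner over the exponent tables, keeping a running power n *= i.
--     dicts = [{} for _ in range(2, max_k + 1)]
--     i = 2
--     while i * i <= max_n:
--         n = i
--         for d in dicts:
--             n *= i
--             if n > max_n:
--                 break
--             d[n] = i
--         i += 1
--     return [None, None] + dicts
-- ===== Notes on version B (the rewrite author's own statement) =====
-- stated objective: faster
-- what changed: B transposes A's nesting: instead of A's exponent-outer loop that for every k up to max_k recomputes i**k from scratch (including the huge big-int probe 2**k that only triggers the break), B pre-allocates one empty dict per exponent and makes a single base-outer pass (while i*i <= max_n) walking the dict list with a running power n *= i and breaking once n exceeds max_n; increasing-base order reproduces A's dicts exactly.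
import Mathlib
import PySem

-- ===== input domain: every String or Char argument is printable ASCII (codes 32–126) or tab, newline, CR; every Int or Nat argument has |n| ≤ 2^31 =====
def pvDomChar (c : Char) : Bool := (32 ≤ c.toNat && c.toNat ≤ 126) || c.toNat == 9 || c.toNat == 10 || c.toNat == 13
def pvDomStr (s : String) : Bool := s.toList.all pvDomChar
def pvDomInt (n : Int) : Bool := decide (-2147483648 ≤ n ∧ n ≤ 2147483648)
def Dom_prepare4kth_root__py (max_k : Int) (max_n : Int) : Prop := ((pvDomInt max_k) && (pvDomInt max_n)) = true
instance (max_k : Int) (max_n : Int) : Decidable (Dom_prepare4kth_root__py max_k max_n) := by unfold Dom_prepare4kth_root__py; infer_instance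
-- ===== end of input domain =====

-- B transposes A's loops: one base-outer pass (while i*i <= max_n) with a running power n *= i
-- fills a pre-allocated list of per-exponent dicts, instead of A's per-exponent base scans.


-- ===== PORT A =====
-- inner 'for i in range(2, 1+max_n): n = i**k; if n > max_n: break; d[n] = i'
-- (Python's range is lazy; the loop is ported as structural recursion on the remaining
--  iteration count (max_n - 1).toNat = len(range(2, 1+max_n)), counter i starting at 2;
--  k comes from range(2, 1+max_k), so k ≥ 2 and 'i**k' is exactly 'i ^ k.toNat')
def pvAInner (k : Int) (max_n : Int) : Nat → Int → PySem.Dict Int Int → PySem.Dict Int Int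
  | 0, _, d => d
  | fuel + 1, i, d =>
    let n := i ^ k.toNat
    if n > max_n then d else pvAInner k max_n fuel (i + 1) (d.insert n i)

-- outer 'for k in range(2, 1+max_k): … _k2pow2rt.append(d)', again as counted recursion on k;
-- the appends are accumulated in reverse (cons) and reversed once at the end, so each append is O(1)
def pvAOuter (max_n : Int) : Nat → Int → List (Option (List (Int × Int))) → List (Option (List (Int × Int)))
  | 0, _, acc => acc.reverse
  | fuel + 1, k, acc =>
    pvAOuter max_n fuel (k + 1)
      (some ((pvAInner k max_n (max_n - 1).toNat 2 PySem.Dict.empty).items) :: acc)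

def prepare4kth_root__py (max_k : Int) (max_n : Int) : List (Option (List (Int × Int))) :=
  pvAOuter max_n (max_k - 1).toNat 2 [none, none]

-- ===== PORT B =====
-- 'n *= i; if n > max_n: break; d[n] = i' walking the pre-allocated dict list:
-- structural recursion on that list, carrying the running power n (pre-multiplication value)
def pvBRow (max_n i : Int) (n : Int) : List (PySem.Dict Int Int) → List (PySem.Dict Int Int)
  | [] => []
  | d :: ds =>
    let n' := n * i
    if n' > max_n then d :: ds else d.insert n' i :: pvBRow max_n i n' ds

-- 'while i * i <= max_n: <row>; i += 1' as counted recursion; the fuel (max_n - 1).toNat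
-- bounds the iteration count (the loop runs only while i*i ≤ max_n, so at most max_n - 1 steps)
def pvBLoop (max_n : Int) : Nat → Int → List (PySem.Dict Int Int) → List (PySem.Dict Int Int)
  | 0, _, ds => ds
  | fuel + 1, i, ds =>
    if i * i ≤ max_n then pvBLoop max_n fuel (i + 1) (pvBRow max_n i i ds) else ds

-- 'dicts = [{} for _ in range(2, max_k + 1)]' = (max_k - 1).toNat empty dicts;
-- '[None, None] + dicts'
def prepare4kth_root__py_alt (max_k : Int) (max_n : Int) : List (Option (List (Int × Int))) :=
  [none, none] ++
    (pvBLoop max_n (max_n - 1).toNat 2 (List.replicate (max_k - 1).toNat PySem.Dict.empty)).map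
      (fun d => some d.items)

-- ===== PRECONDITION & SPEC =====
def Spec_prepare4kth_root__py (max_k : Int) (max_n : Int) (out : List (Option (List (Int × Int)))) : Prop := out = prepare4kth_root__py_alt max_k max_n
instance (max_k : Int) (max_n : Int) (out : List (Option (List (Int × Int)))) : Decidable (Spec_prepare4kth_root__py max_k max_n out) := by unfold Spec_prepare4kth_root__py; infer_instance

-- ===== CLAIM (what is proved, stated in full; the proofs are below) =====
def Claim_equal_prepare4kth_root__py : Prop := ∀ (max_k : Int) (max_n : Int), Dom_prepare4kth_root__py max_k max_n → Spec_prepare4kth_root__py max_k max_n (prepare4kth_root__py max_k max_n)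

-- ===== LEMMAS AND PROOFS =====

-- fuel-free description of the qualifying bases (proof-side only)
def pvRoots (max_n : Int) (i : Int) : List Int :=
  if i * i ≤ max_n then i :: pvRoots max_n (i + 1) else []
termination_by (max_n + 1 - i).toNat
decreasing_by
  have hii : i ≤ i * i := by nlinarith [sq_nonneg i, sq_nonneg (i - 1)]
  omega

-- the per-exponent table both programs produce
def pvLevel (max_n k : Int) : List (Int × Int) :=
  ((pvRoots max_n 2).filter (fun i => i ^ k.toNat ≤ max_n)).map (fun i => (i ^ k.toNat, i))

-- same with a Nat exponent (B-side indexing)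
def pvLevelN (max_n : Int) (e : Nat) : List (Int × Int) :=
  ((pvRoots max_n 2).filter (fun i => i ^ e ≤ max_n)).map (fun i => (i ^ e, i))

theorem mem_pvRoots {max_n i j : Int} (h : j ∈ pvRoots max_n i) : i ≤ j ∧ j * j ≤ max_n := by
  induction i using pvRoots.induct max_n with
  | case1 i hc ih =>
    rw [pvRoots, if_pos hc] at h
    rcases List.mem_cons.mp h with rfl | h
    · exact ⟨le_refl _, hc⟩
    · exact ⟨by linarith [(ih h).1], (ih h).2⟩
  | case2 i hc =>
    rw [pvRoots, if_neg hc] at h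
    simp at h

theorem pvRoots_empty {max_n i : Int} (h : ¬ i * i ≤ max_n) : pvRoots max_n i = [] := by
  rw [pvRoots, if_neg h]

-- ---- A side ----

-- A's inner loop, started at base i with accumulated dict d whose keys all lie below i^K,
-- appends exactly the (j^K, j) pairs for the qualifying bases j ≥ i.
theorem pvA_inner_go (max_n : Int) (K : Nat) (hK : 2 ≤ K) :
    ∀ (fuel : Nat) (i : Int), (max_n + 1 - i).toNat ≤ fuel → 2 ≤ i →
    ∀ (d : PySem.Dict Int Int), (∀ p ∈ d.items, p.1 < i ^ K) →
    (pvAInner (K : Int) max_n fuel i d).items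
      = d.items ++ ((pvRoots max_n i).filter (fun j => j ^ K ≤ max_n)).map
          (fun j => (j ^ K, j)) := by
  intro fuel
  induction fuel with
  | zero =>
    intro i hfuel hi d hd
    have hni : max_n < i := by omega
    rw [pvAInner, pvRoots_empty (by nlinarith)]
    simp
  | succ fuel ih =>
    intro i hfuel hi d hd
    rw [pvAInner]
    simp only [Int.toNat_natCast]
    by_cases hbig : i ^ K > max_n
    · rw [if_pos hbig]
      have hempty : (pvRoots max_n i).filter (fun j => j ^ K ≤ max_n) = [] := by
        apply List.filter_eq_nil_iff.mpr
        intro j hj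
        have hm := mem_pvRoots hj
        have hij : i ^ K ≤ j ^ K := pow_le_pow_left₀ (by omega) hm.1 K
        simp only [decide_eq_true_eq]
        omega
      rw [hempty]; simp
    · rw [if_neg hbig]
      push_neg at hbig
      have hle : i ≤ max_n := by
        have h1 : i ≤ i ^ K :=
          le_self_pow₀ (by omega) (by omega)
        omega
      have hfresh : d.contains (i ^ K) = false := by
        by_contra hc
        have hc' : d.contains (i ^ K) = true := by
          cases h : d.contains (i ^ K) with
          | false => exact absurd h hc
          | true => rfl
        have hmem := (PySem.Dict.contains_iff_mem_keys d (i ^ K)).mp hc'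
        simp only [PySem.Dict.keys, List.mem_map] at hmem
        obtain ⟨p, hp, hpe⟩ := hmem
        have := hd p hp
        omega
      have hitems : (d.insert (i ^ K) i).items = d.items ++ [(i ^ K, i)] :=
        PySem.Dict.items_insert_of_not_contains d i hfresh
      have hmono : i ^ K < (i + 1) ^ K :=
        pow_lt_pow_left₀ (by omega) (by omega) (by omega)
      have hrec := ih (i + 1) (by omega) (by omega) (d.insert (i ^ K) i)
        (by intro p hp
            rw [hitems] at hp
            rcases List.mem_append.mp hp with hp | hp
            · have := hd p hp; omega
            · simp at hp; subst hp; simpa using hmono)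
      rw [hrec, hitems]
      have hsq : i * i ≤ max_n := by
        have h2 : i ^ 2 ≤ i ^ K := pow_le_pow_right₀ (by omega) hK
        nlinarith [h2]
      have hB : pvRoots max_n i = i :: pvRoots max_n (i + 1) := by
        rw [pvRoots, if_pos hsq]
      rw [hB]
      simp only [List.filter_cons, decide_eq_true_eq]
      rw [if_pos hbig]
      simp

theorem pvA_level (max_n k : Int) (hk : 2 ≤ k) :
    (pvAInner k max_n (max_n - 1).toNat 2 PySem.Dict.empty).items = pvLevel max_n k := by
  have hKcast : ((k.toNat : Int)) = k := by omega
  have h := pvA_inner_go max_n k.toNat (by omega) (max_n - 1).toNat 2 (by omega) (le_refl _)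
    PySem.Dict.empty (by intro p hp; simp [PySem.Dict.empty] at hp)
  rw [hKcast] at h
  rw [h, pvLevel]
  simp [PySem.Dict.empty]

theorem pvA_outer_go (max_k max_n : Int) :
    ∀ (fuel : Nat) (a : Int), fuel = (1 + max_k - a).toNat → 2 ≤ a →
    ∀ (acc : List (Option (List (Int × Int)))),
    pvAOuter max_n fuel a acc
      = acc.reverse ++ (PySem.List.pyRange a (1 + max_k) 1).map (fun k => some (pvLevel max_n k)) := by
  intro fuel
  induction fuel with
  | zero =>
    intro a hfuel ha acc
    rw [pvAOuter, PySem.List.pyRange_one_eq_nil (by omega)]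
    simp
  | succ fuel ih =>
    intro a hfuel ha acc
    have h : a < 1 + max_k := by
      omega
    rw [pvAOuter, PySem.List.pyRange_one_cons h,
        ih (a + 1) (by omega) (by omega), pvA_level max_n a ha]
    simp

-- pyRange with step 1 re-indexed from 0
theorem pvRange_reindex (f : Int → Option (List (Int × Int))) :
    ∀ (m : Nat) (a : Int),
    (PySem.List.pyRange a (a + m) 1).map f
      = (List.range m).map (fun (j : Nat) => f (a + (j : Int))) := by
  intro m
  induction m with
  | zero => intro a; rw [PySem.List.pyRange_one_eq_nil (by omega)]; simp
  | succ m ih =>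
    intro a
    have h : a < a + (m + 1 : Nat) := by omega
    rw [PySem.List.pyRange_one_cons h]
    have h2 : a + ((m + 1 : Nat) : Int) = (a + 1) + (m : Nat) := by push_cast; ring
    rw [List.map_cons, h2, ih (a + 1), List.range_succ_eq_map, List.map_cons, List.map_map]
    congr 1
    · norm_num
    · apply List.map_congr_left
      intro j hj
      simp only [Function.comp_apply]
      congr 1
      push_cast
      ring

-- ---- B side ----

-- one base's row, written index-wise: position with exponent e either inserts or is untouched
def pvColMap (max_n i : Int) : Nat → List (PySem.Dict Int Int) → List (PySem.Dict Int Int)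
  | _, [] => []
  | e, d :: ds =>
    (if i ^ e ≤ max_n then d.insert (i ^ e) i else d) :: pvColMap max_n i (e + 1) ds

theorem pvColMap_id (max_n i : Int) (hi : 2 ≤ i) :
    ∀ (ds : List (PySem.Dict Int Int)) (e : Nat), max_n < i ^ e → pvColMap max_n i e ds = ds := by
  intro ds
  induction ds with
  | nil => intro e _; rfl
  | cons d ds ih =>
    intro e he
    have hmono : i ^ e ≤ i ^ (e + 1) := pow_le_pow_right₀ (by omega) (by omega)
    rw [pvColMap, if_neg (by omega), ih (e + 1) (by omega)]

-- the break in pvBRow agrees with the index-wise form (powers of i ≥ 2 are monotone in e)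
theorem pvBRow_eq_colMap (max_n i : Int) (hi : 2 ≤ i) :
    ∀ (ds : List (PySem.Dict Int Int)) (e : Nat), 1 ≤ e →
    pvBRow max_n i (i ^ e) ds = pvColMap max_n i (e + 1) ds := by
  intro ds
  induction ds with
  | nil => intro e _; rfl
  | cons d ds ih =>
    intro e he
    have hp : i ^ e * i = i ^ (e + 1) := (pow_succ i e).symm
    by_cases hb : i ^ e * i > max_n
    · rw [pvBRow]
      simp only [hb, if_pos]
      rw [pvColMap, if_neg (by omega), pvColMap_id max_n i hi ds (e + 2)
        (by have : i ^ (e + 1) ≤ i ^ (e + 2) := pow_le_pow_right₀ (by omega) (by omega); omega)]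
    · rw [pvBRow]
      simp only [hb, if_neg, not_false_eq_true]
      rw [pvColMap, if_pos (by omega), hp, ih (e + 1) (by omega)]

-- the whole while loop in index-wise form
def pvBLoopE (max_n : Int) (e : Nat) : Nat → Int → List (PySem.Dict Int Int) → List (PySem.Dict Int Int)
  | 0, _, ds => ds
  | fuel + 1, i, ds =>
    if i * i ≤ max_n then pvBLoopE max_n e fuel (i + 1) (pvColMap max_n i e ds) else ds

theorem pvBLoop_eq_loopE (max_n : Int) :
    ∀ (fuel : Nat) (i : Int), 2 ≤ i → ∀ ds,
    pvBLoop max_n fuel i ds = pvBLoopE max_n 2 fuel i ds := by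
  intro fuel
  induction fuel with
  | zero => intro i _ ds; rfl
  | succ fuel ih =>
    intro i hi ds
    rw [pvBLoop, pvBLoopE]
    by_cases hc : i * i ≤ max_n
    · rw [if_pos hc, if_pos hc]
      have hrow : pvBRow max_n i i ds = pvColMap max_n i 2 ds := by
        have := pvBRow_eq_colMap max_n i hi ds 1 (le_refl _)
        rwa [pow_one] at this
      rw [hrow, ih (i + 1) (by omega)]
    · rw [if_neg hc, if_neg hc]

theorem pvBLoopE_nil (max_n : Int) (e : Nat) :
    ∀ (fuel : Nat) (i : Int), pvBLoopE max_n e fuel i [] = [] := by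
  intro fuel
  induction fuel with
  | zero => intro i; rfl
  | succ fuel ih =>
    intro i
    rw [pvBLoopE]
    by_cases hc : i * i ≤ max_n
    · rw [if_pos hc]; exact ih (i + 1)
    · rw [if_neg hc]

-- the column loop a single position undergoes
def pvColE (max_n : Int) (e : Nat) : Nat → Int → PySem.Dict Int Int → PySem.Dict Int Int
  | 0, _, d => d
  | fuel + 1, i, d =>
    if i * i ≤ max_n then
      pvColE max_n e fuel (i + 1) (if i ^ e ≤ max_n then d.insert (i ^ e) i else d)
    else d

theorem pvBLoopE_cons (max_n : Int) :
    ∀ (fuel : Nat) (e : Nat) (i : Int) (d : PySem.Dict Int Int) ds,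
    pvBLoopE max_n e fuel i (d :: ds)
      = pvColE max_n e fuel i d :: pvBLoopE max_n (e + 1) fuel i ds := by
  intro fuel
  induction fuel with
  | zero => intro e i d ds; rfl
  | succ fuel ih =>
    intro e i d ds
    by_cases hc : i * i ≤ max_n
    · rw [pvBLoopE, if_pos hc, pvColMap, ih]
      conv_rhs => rw [pvColE, pvBLoopE]
      rw [if_pos hc, if_pos hc]
    · rw [pvBLoopE, if_neg hc]
      conv_rhs => rw [pvColE, pvBLoopE]
      rw [if_neg hc, if_neg hc]

-- one column, from a dict with small keys, appends its qualifying (b^e, b) pairs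
theorem pvColE_go (max_n : Int) (e : Nat) (he : 2 ≤ e) :
    ∀ (fuel : Nat) (i : Int), (max_n + 1 - i).toNat ≤ fuel → 2 ≤ i →
    ∀ (d : PySem.Dict Int Int), (∀ p ∈ d.items, p.1 < i ^ e) →
    (pvColE max_n e fuel i d).items
      = d.items ++ ((pvRoots max_n i).filter (fun b => b ^ e ≤ max_n)).map
          (fun b => (b ^ e, b)) := by
  intro fuel
  induction fuel with
  | zero =>
    intro i hfuel hi d hd
    have hni : max_n < i := by omega
    rw [pvColE, pvRoots_empty (by nlinarith)]
    simp
  | succ fuel ih =>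
    intro i hfuel hi d hd
    rw [pvColE]
    by_cases hc : i * i ≤ max_n
    · rw [if_pos hc]
      have hle : i ≤ max_n := by nlinarith
      have hmono : i ^ e < (i + 1) ^ e :=
        pow_lt_pow_left₀ (by omega) (by omega) (by omega)
      have hR : pvRoots max_n i = i :: pvRoots max_n (i + 1) := by
        rw [pvRoots, if_pos hc]
      by_cases hin : i ^ e ≤ max_n
      · rw [if_pos hin]
        have hfresh : d.contains (i ^ e) = false := by
          by_contra hcon
          have hc' : d.contains (i ^ e) = true := by
            cases h : d.contains (i ^ e) with
            | false => exact absurd h hcon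
            | true => rfl
          have hmem := (PySem.Dict.contains_iff_mem_keys d (i ^ e)).mp hc'
          simp only [PySem.Dict.keys, List.mem_map] at hmem
          obtain ⟨p, hp, hpe⟩ := hmem
          have := hd p hp
          omega
        have hitems : (d.insert (i ^ e) i).items = d.items ++ [(i ^ e, i)] :=
          PySem.Dict.items_insert_of_not_contains d i hfresh
        rw [ih (i + 1) (by omega) (by omega) (d.insert (i ^ e) i)
          (by intro p hp
              rw [hitems] at hp
              rcases List.mem_append.mp hp with hp | hp
              · have := hd p hp; omega
              · simp at hp; subst hp; simpa using hmono),
          hitems, hR]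
        simp only [List.filter_cons, decide_eq_true_eq]
        rw [if_pos hin]
        simp
      · rw [if_neg hin]
        rw [ih (i + 1) (by omega) (by omega) d
          (by intro p hp; have := hd p hp; omega), hR]
        simp only [List.filter_cons, decide_eq_true_eq]
        rw [if_neg hin]
    · rw [if_neg hc, pvRoots_empty hc]
      simp

-- the whole of B's dict list, as pvLevelN per position
theorem pvB_table (max_n : Int) :
    ∀ (m : Nat) (e : Nat), 2 ≤ e →
    (pvBLoopE max_n e (max_n - 1).toNat 2 (List.replicate m PySem.Dict.empty)).map
        (fun d => some d.items)
      = (List.range m).map (fun j => some (pvLevelN max_n (e + j))) := by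
  intro m
  induction m with
  | zero => intro e _; rw [List.replicate_zero, pvBLoopE_nil]; simp
  | succ m ih =>
    intro e he
    rw [List.replicate_succ, pvBLoopE_cons, List.map_cons,
      pvColE_go max_n e he (max_n - 1).toNat 2 (by omega) (le_refl _) PySem.Dict.empty
        (by intro p hp; simp [PySem.Dict.empty] at hp),
      ih (e + 1) (by omega), List.range_succ_eq_map, List.map_cons, List.map_map]
    have hhead : (PySem.Dict.empty : PySem.Dict Int Int).items
        ++ ((pvRoots max_n 2).filter (fun b => b ^ e ≤ max_n)).map (fun b => (b ^ e, b))
        = pvLevelN max_n (e + 0) := by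
      simp [PySem.Dict.empty, pvLevelN]
    rw [hhead]
    congr 1
    apply List.map_congr_left
    intro j hj
    simp only [Function.comp_apply]
    have h3 : e + 1 + j = e + (j + 1) := by omega
    rw [h3]

-- ===== VERDICT (by name: the statement is the Claim_ definition above) =====
theorem prepare4kth_root__py_spec : Claim_equal_prepare4kth_root__py := by
  intro max_k max_n _
  unfold Spec_prepare4kth_root__py prepare4kth_root__py prepare4kth_root__py_alt
  rw [pvA_outer_go max_k max_n (max_k - 1).toNat 2 (by omega) (le_refl _)]
  rw [pvBLoop_eq_loopE max_n _ 2 (le_refl _), pvB_table max_n _ 2 (le_refl _)]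
  by_cases hk : max_k ≤ 1
  · rw [PySem.List.pyRange_one_eq_nil (by omega)]
    have : (max_k - 1).toNat = 0 := by omega
    rw [this]
    simp
  · have h2 : (1 : Int) + max_k = 2 + ((max_k - 1).toNat : Nat) := by omega
    rw [h2, pvRange_reindex]
    simp only [List.reverse_cons, List.reverse_nil, List.nil_append, List.cons_append]
    congr 2
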